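-- pv_equiv track=rewrite | github.com/GamingwithJJ/CafeBot | FunModule.py | build_family_rows
-- ===== SOURCE A (Python) =====
-- def build_family_rows(root_id: int, graph: dict, levels: dict[int, int], name_map: dict[int, str]) -> list[tuple[int, list[int]]]:
--     row_map = {}
--     for user_id in graph:
--         level = levels.get(user_id, 0)
--         row_map.setdefault(level, []).append(user_id)
--
--     rows = []
--     for level in sorted(row_map):
--         ids = row_map[level]
--         if level == 0:
--             partners = sorted([user_id for user_id in ids if user_id != root_id], key=lambda uid: name_map[uid].lower())
--             ordered = [root_id] + partners if root_id in ids else partners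
--         else:
--             ordered = sorted(ids, key=lambda uid: name_map[uid].lower())
--         rows.append((level, ordered))
--     return rows
-- ===== SOURCE B (Python) =====
-- from itertools import groupby
--
--
-- def build_family_rows(root_id: int, graph: dict, levels: dict[int, int], name_map: dict[int, str]) -> list[tuple[int, list[int]]]:
--     # One stable sort over all users by (level, text): the root at level 0 gets the
--     # empty text, every other user a NUL-prefixed lowercase name (so root sorts first
--     # in its level and the rest by name); then group consecutive equal levels.
--     def sort_text(uid):
--         if levels.get(uid, 0) == 0 and uid == root_id:
--             return ""
--         return "\x00" + name_map[uid].lower()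
--
--     keyed = sorted(graph, key=lambda uid: (levels.get(uid, 0), sort_text(uid)))
--     return [(level, list(grp)) for level, grp in groupby(keyed, key=lambda uid: levels.get(uid, 0))]
-- ===== Notes on version B (the rewrite author's own statement) =====
-- stated objective: alternative
-- what changed: A groups user_ids into a level-keyed dict and then sorts each group separately (root pulled out by hand at level 0); B performs one stable sort of all user_ids by a composite (level, text) key in which the root at level 0 gets the empty text, and then groups consecutive equal levels with itertools.groupby.
import Mathlib
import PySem

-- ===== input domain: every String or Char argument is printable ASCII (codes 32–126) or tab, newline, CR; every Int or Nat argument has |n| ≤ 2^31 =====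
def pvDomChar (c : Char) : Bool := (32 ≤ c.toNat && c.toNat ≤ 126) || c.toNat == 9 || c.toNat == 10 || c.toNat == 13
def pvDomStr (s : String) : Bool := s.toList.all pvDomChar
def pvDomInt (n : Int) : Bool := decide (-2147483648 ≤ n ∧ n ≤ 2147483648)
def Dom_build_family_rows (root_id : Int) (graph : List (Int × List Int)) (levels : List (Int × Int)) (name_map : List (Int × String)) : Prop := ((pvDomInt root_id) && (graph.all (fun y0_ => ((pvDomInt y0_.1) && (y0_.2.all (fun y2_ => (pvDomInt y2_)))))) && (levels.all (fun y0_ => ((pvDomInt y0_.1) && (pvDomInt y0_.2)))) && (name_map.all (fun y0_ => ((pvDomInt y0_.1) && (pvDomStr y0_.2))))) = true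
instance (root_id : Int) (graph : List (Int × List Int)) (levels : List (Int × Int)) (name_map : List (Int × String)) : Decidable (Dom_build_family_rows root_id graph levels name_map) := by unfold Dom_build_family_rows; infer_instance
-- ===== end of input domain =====

-- ===== PORT A =====
-- B = one stable sort by a (level, text) key + consecutive grouping instead of A's dict-of-levels
-- with a per-level sort (alternative decomposition; no speed claim).
-- Python string comparison is lexicographic on code points; .lower() keys are ported as
-- PySem.Chars.lower on toList and compared with the List Char lexicographic order (exact).
def pvA_nameKey (nmD : PySem.Dict Int String) (u : Int) : List Char :=
  PySem.Chars.lower (nmD.getD u "").toList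

def build_family_rows (root_id : Int) (graph : List (Int × List Int)) (levels : List (Int × Int)) (name_map : List (Int × String)) : List (Int × List Int) :=
  let lvD := PySem.Dict.ofList levels
  let nmD := PySem.Dict.ofList name_map
  -- row_map.setdefault(level, []).append(user_id), looping over graph's keys
  let row_map := ((PySem.Dict.ofList graph).keys).foldl
      (fun d u => d.modify (lvD.getD u 0) [] (fun l => l ++ [u])) PySem.Dict.empty
  (PySem.List.sorted row_map.keys (fun x => x) false).foldl (fun rows level =>
      let ids := row_map.getD level []
      let ordered :=
        if level = 0 then
          let partners := PySem.List.sorted (ids.filter (fun u => u ≠ root_id))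
              (fun u => pvA_nameKey nmD u) false
          if root_id ∈ ids then root_id :: partners else partners
        else
          PySem.List.sorted ids (fun u => pvA_nameKey nmD u) false
      rows ++ [(level, ordered)]) []

-- ===== PORT B =====
def pvB_level (lvD : PySem.Dict Int Int) (u : Int) : Int := lvD.getD u 0

-- sort_text(uid): "" for the root at level 0, else "\x00" + name.lower()
def pvB_sortText (root_id : Int) (lvD : PySem.Dict Int Int) (nmD : PySem.Dict Int String) (u : Int) : List Char :=
  if pvB_level lvD u = 0 ∧ u = root_id then []
  else '\x00' :: PySem.Chars.lower (nmD.getD u "").toList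

-- itertools.groupby by level, groups materialised as lists
def pvB_group (lvf : Int → Int) : List Int → List (Int × List Int)
  | [] => []
  | u :: rest =>
      (lvf u, u :: rest.takeWhile (fun v => lvf v == lvf u)) ::
        pvB_group lvf (rest.dropWhile (fun v => lvf v == lvf u))
termination_by l => l.length
decreasing_by simpa using Nat.lt_succ_of_le (List.length_dropWhile_le _ rest)

def build_family_rows_alt (root_id : Int) (graph : List (Int × List Int)) (levels : List (Int × Int)) (name_map : List (Int × String)) : List (Int × List Int) :=
  let lvD := PySem.Dict.ofList levels
  let nmD := PySem.Dict.ofList name_map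
  let keyed := PySem.List.sorted2 ((PySem.Dict.ofList graph).keys)
      (fun u => pvB_level lvD u) (fun u => pvB_sortText root_id lvD nmD u) false
  pvB_group (fun u => pvB_level lvD u) keyed

-- ===== PRECONDITION & SPEC =====
-- Pre_ excludes exactly the inputs where Python A raises KeyError: some user in graph that
-- needs a name sort key (i.e. is not the root sitting at level 0) is missing from name_map.
def Pre_build_family_rows (root_id : Int) (graph : List (Int × List Int)) (levels : List (Int × Int)) (name_map : List (Int × String)) : Prop :=
  ∀ u ∈ (PySem.Dict.ofList graph).keys,
    ((PySem.Dict.ofList levels).getD u 0 = 0 ∧ u = root_id) ∨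
      (PySem.Dict.ofList name_map).contains u = true

instance (root_id : Int) (graph : List (Int × List Int)) (levels : List (Int × Int)) (name_map : List (Int × String)) : Decidable (Pre_build_family_rows root_id graph levels name_map) := by
  unfold Pre_build_family_rows; infer_instance

def pvWitness_build_family_rows : Int × (List (Int × List Int)) × (List (Int × Int)) × (List (Int × String)) :=
  (1, [(1, [2]), (2, []), (3, [])], [(2, 1), (3, 1)], [(2, "Bob"), (3, "alice")])
def Spec_build_family_rows (root_id : Int) (graph : List (Int × List Int)) (levels : List (Int × Int)) (name_map : List (Int × String)) (out : List (Int × List Int)) : Prop := out = build_family_rows_alt root_id graph levels name_map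
instance (root_id : Int) (graph : List (Int × List Int)) (levels : List (Int × Int)) (name_map : List (Int × String)) (out : List (Int × List Int)) : Decidable (Spec_build_family_rows root_id graph levels name_map out) := by unfold Spec_build_family_rows; infer_instance

-- ===== CLAIM (what is proved, stated in full; the proofs are below) =====
def Claim_equal_build_family_rows : Prop := ∀ (root_id : Int) (graph : List (Int × List Int)) (levels : List (Int × Int)) (name_map : List (Int × String)), Dom_build_family_rows root_id graph levels name_map → Pre_build_family_rows root_id graph levels name_map → Spec_build_family_rows root_id graph levels name_map (build_family_rows root_id graph levels name_map)

-- ===== LEMMAS AND PROOFS =====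

-- comparator of sorted2
def pvLex (k1 : Int → Int) (k2 : Int → List Char) (a b : Int) : Bool :=
  decide (k1 a < k1 b) || (!decide (k1 b < k1 a) && decide (k2 a < k2 b))

theorem pvSorted2_foldl (xs : List Int) (k1 : Int → Int) (k2 : Int → List Char) :
    PySem.List.sorted2 xs k1 k2 false
      = xs.foldl (fun acc x => PySem.List.insertBy (pvLex k1 k2) x acc) [] := rfl

theorem pvSorted_foldl {α : Type} (xs : List α) (key : α → List Char) :
    PySem.List.sorted xs key false
      = xs.foldl (fun acc x => PySem.List.insertBy (fun a b => decide (key a < key b)) x acc) [] := rfl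

theorem pvSortedInt_foldl (xs : List Int) :
    PySem.List.sorted xs (fun x => x) false
      = xs.foldl (fun acc x => PySem.List.insertBy (fun a b : Int => decide (a < b)) x acc) [] := rfl

-- insertBy mini-lemmas
theorem pvInsertBy_front {α : Type} (before : α → α → Bool) (x : α) (ys : List α)
    (h : ∀ y ∈ ys, before x y = true) :
    PySem.List.insertBy before x ys = x :: ys := by
  cases ys with
  | nil => rfl
  | cons y t => simp [PySem.List.insertBy, h y (by simp)]

theorem pvInsertBy_append_skip {α : Type} (before : α → α → Bool) (x : α) (bl rest : List α)
    (h : ∀ y ∈ bl, before x y = false) :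
    PySem.List.insertBy before x (bl ++ rest) = bl ++ PySem.List.insertBy before x rest := by
  induction bl with
  | nil => rfl
  | cons b t ih =>
      simp only [List.cons_append, PySem.List.insertBy, h b (by simp)]
      simp only [Bool.false_eq_true, if_false, List.cons.injEq, true_and]
      exact ih (fun y hy => h y (by simp [hy]))

theorem pvInsertBy_append_congr {α : Type} (before before' : α → α → Bool) (x : α) (bl rest : List α)
    (h1 : ∀ y ∈ bl, before x y = before' x y) (h2 : ∀ y ∈ rest, before x y = true) :
    PySem.List.insertBy before x (bl ++ rest) = PySem.List.insertBy before' x bl ++ rest := by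
  induction bl with
  | nil => simp [pvInsertBy_front before x rest h2, PySem.List.insertBy]
  | cons b t ih =>
      have hb := h1 b (by simp)
      by_cases hbx : before x b = true
      · simp [PySem.List.insertBy, hbx, hb ▸ hbx]
      · simp only [List.cons_append, PySem.List.insertBy, Bool.not_eq_true] at *
        simp [hbx, hb ▸ hbx, ih (fun y hy => h1 y (by simp [hy]))]

theorem pvInsertBy_congr {α : Type} (before before' : α → α → Bool) (x : α) (ys : List α)
    (h : ∀ y ∈ ys, before x y = before' x y) :
    PySem.List.insertBy before x ys = PySem.List.insertBy before' x ys := by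
  induction ys with
  | nil => rfl
  | cons y t ih =>
      simp only [PySem.List.insertBy, h y (by simp)]
      by_cases hy : before' x y = true
      · simp [hy]
      · simp only [Bool.not_eq_true] at hy
        simp [hy, ih (fun z hz => h z (by simp [hz]))]

-- sorted with two keys that induce the same order on the list's elements
theorem pvSorted_congr (key key' : Int → List Char) (ids : List Int)
    (h : ∀ a ∈ ids, ∀ b ∈ ids, (key a < key b ↔ key' a < key' b)) :
    PySem.List.sorted ids key false = PySem.List.sorted ids key' false := by
  induction ids using List.reverseRecOn with
  | nil => rfl
  | append_singleton p x ih =>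
      have hp : ∀ a ∈ p, ∀ b ∈ p, (key a < key b ↔ key' a < key' b) := by
        intro a ha b hb; exact h a (by simp [ha]) b (by simp [hb])
      rw [pvSorted_foldl, pvSorted_foldl, List.foldl_append, List.foldl_append]
      simp only [List.foldl]
      rw [← pvSorted_foldl, ← pvSorted_foldl, ih hp]
      apply pvInsertBy_congr
      intro y hy
      have hyp : y ∈ p := ((PySem.List.mem_sorted p key' false y).mp (by
        rw [pvSorted_foldl]; exact hy))
      exact decide_eq_decide.mpr (h x (by simp) y (by simp [hyp]))

-- an element strictly below every other sorts to the front
theorem pvSorted_min_front (key : Int → List Char) (x : Int) (ids : List Int)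
    (hnd : ids.Nodup) (hx : x ∈ ids) (hmin : ∀ u ∈ ids, u ≠ x → key x < key u) :
    PySem.List.sorted ids key false
      = x :: PySem.List.sorted (ids.filter (fun u => u ≠ x)) key false := by
  induction ids using List.reverseRecOn with
  | nil => simp at hx
  | append_singleton p u ih =>
      rw [pvSorted_foldl, List.foldl_append]
      simp only [List.foldl]
      rw [← pvSorted_foldl]
      by_cases hux : u = x
      · subst hux
        have hup : u ∉ p := by
          have := List.disjoint_of_nodup_append hnd
          intro hc; exact this hc (by simp)
        have hfilt : p.filter (fun v => v ≠ u) = p :=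
          List.filter_eq_self.mpr (fun a ha => by
            simp only [decide_eq_true_eq]; intro hc; exact hup (hc ▸ ha))
        rw [List.filter_append]
        simp only [List.filter_cons, List.filter_nil]
        simp only [decide_eq_true_eq]
        rw [if_neg (by simp), hfilt]
        simp only [List.append_nil]
        apply pvInsertBy_front
        intro y hy
        have hyp : y ∈ p := (PySem.List.mem_sorted p key false y).mp hy
        have hyx : y ≠ u := fun hc => hup (hc ▸ hyp)
        exact decide_eq_true (hmin y (by simp [hyp]) hyx)
      · have hxp : x ∈ p := by
          rcases List.mem_append.mp hx with h | h
          · exact h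
          · simp at h; exact absurd h.symm hux
        have hndp : p.Nodup := hnd.of_append_left
        have hminp : ∀ v ∈ p, v ≠ x → key x < key v := fun v hv => hmin v (by simp [hv])
        rw [ih hndp hxp hminp]
        have hkey : key x < key u := hmin u (by simp) hux
        have hcmp : decide (key u < key x) = false := by
          simp only [decide_eq_false_iff_not]; exact fun hc => absurd hkey (lt_asymm hc)
        rw [List.filter_append]
        simp only [List.filter_cons, List.filter_nil, decide_eq_true_eq]
        rw [if_pos hux]
        rw [pvSorted_foldl (p.filter (fun u_1 => u_1 ≠ x) ++ [u]), List.foldl_append]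
        simp only [List.foldl]
        rw [← pvSorted_foldl]
        show PySem.List.insertBy _ u (x :: _) = _
        simp only [PySem.List.insertBy, hcmp]
        simp

theorem pvInsertBy_cons {α : Type} (before : α → α → Bool) (x y : α) (ys : List α) :
    PySem.List.insertBy before x (y :: ys)
      = if before x y = true then x :: y :: ys else y :: PySem.List.insertBy before x ys := rfl

-- inserting x into the flattened blocks when its level is already present
theorem pvIns_mem (k1 : Int → Int) (k2 : Int → List Char) (x : Int) (S : List Int)
    (B : Int → List Int) (hS : S.Pairwise (· < ·))
    (hB : ∀ L ∈ S, ∀ u ∈ B L, k1 u = L) (hx : k1 x ∈ S) :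
    PySem.List.insertBy (pvLex k1 k2) x ((S.map B).flatten)
      = (S.map (fun L => if L = k1 x
          then PySem.List.insertBy (fun a b => decide (k2 a < k2 b)) x (B L)
          else B L)).flatten := by
  induction S with
  | nil => simp at hx
  | cons L S' ih =>
      have hlt : ∀ L' ∈ S', L < L' := (List.pairwise_cons.mp hS).1
      have hS' : S'.Pairwise (· < ·) := (List.pairwise_cons.mp hS).2
      have hB' : ∀ L' ∈ S', ∀ u ∈ B L', k1 u = L' := fun L' h' => hB L' (by simp [h'])
      simp only [List.map_cons, List.flatten_cons]
      by_cases hLx : L = k1 x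
      · rw [pvInsertBy_append_congr (pvLex k1 k2) (fun a b => decide (k2 a < k2 b)) x (B L)
              ((S'.map B).flatten)
              (fun y hy => by
                have hk : k1 y = L := hB L (by simp) y hy
                have h1 : ¬ (k1 x < k1 y) := by rw [hk, ← hLx]; exact lt_irrefl L
                have h2 : ¬ (k1 y < k1 x) := by rw [hk, ← hLx]; exact lt_irrefl L
                simp [pvLex, h1, h2])
              (fun y hy => by
                rcases List.mem_flatten.mp hy with ⟨l, hl, hyl⟩
                rcases List.mem_map.mp hl with ⟨L', hL', rfl⟩
                have hk : k1 y = L' := hB' L' hL' y hyl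
                have : k1 x < k1 y := by rw [hk, ← hLx]; exact hlt L' hL'
                simp [pvLex, this])]
        rw [if_pos hLx]
        congr 2
        apply List.map_congr_left
        intro L' hL'
        rw [if_neg (show ¬ (L' = k1 x) from fun hc => absurd ((hc.trans hLx.symm) ▸ hlt L' hL') (lt_irrefl _))]
      · have hxS' : k1 x ∈ S' := by
          rcases (List.mem_cons.mp hx) with h | h
          · exact absurd h.symm hLx
          · exact h
        have hLlt : L < k1 x := hlt _ hxS'
        rw [pvInsertBy_append_skip (pvLex k1 k2) x (B L) ((S'.map B).flatten)
              (fun y hy => by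
                have hk : k1 y = L := hB L (by simp) y hy
                have h1 : ¬ (k1 x < k1 y) := by rw [hk]; exact fun hc => absurd hLlt (lt_asymm hc)
                have h2 : k1 y < k1 x := hk ▸ hLlt
                simp [pvLex, h1, h2])]
        rw [ih hS' hB' hxS', if_neg hLx]

-- inserting x into the flattened blocks when its level is new
theorem pvIns_new (k1 : Int → Int) (k2 : Int → List Char) (x : Int) (S : List Int)
    (B : Int → List Int) (hS : S.Pairwise (· < ·))
    (hB : ∀ L ∈ S, ∀ u ∈ B L, k1 u = L) (hx : k1 x ∉ S) :
    PySem.List.insertBy (pvLex k1 k2) x ((S.map B).flatten)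
      = ((PySem.List.insertBy (fun a b : Int => decide (a < b)) (k1 x) S).map
          (fun L => if L = k1 x then [x] else B L)).flatten := by
  induction S with
  | nil => simp [PySem.List.insertBy]
  | cons L S' ih =>
      have hlt : ∀ L' ∈ S', L < L' := (List.pairwise_cons.mp hS).1
      have hS' : S'.Pairwise (· < ·) := (List.pairwise_cons.mp hS).2
      have hB' : ∀ L' ∈ S', ∀ u ∈ B L', k1 u = L' := fun L' h' => hB L' (by simp [h'])
      have hLx : ¬ (k1 x = L) := fun hc => hx (by rw [hc]; exact List.mem_cons_self)
      have hxS' : k1 x ∉ S' := fun hc => hx (List.mem_cons_of_mem L hc)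
      simp only [List.map_cons, List.flatten_cons]
      rw [pvInsertBy_cons (fun a b : Int => decide (a < b)) (k1 x) L S']
      by_cases hcase : k1 x < L
      · rw [if_pos (decide_eq_true hcase)]
        rw [pvInsertBy_front (pvLex k1 k2) x _
              (fun y hy => by
                rcases List.mem_append.mp hy with h | h
                · have hk : k1 y = L := hB L (by simp) y h
                  have : k1 x < k1 y := hk ▸ hcase
                  simp [pvLex, this]
                · rcases List.mem_flatten.mp h with ⟨l, hl, hyl⟩
                  rcases List.mem_map.mp hl with ⟨L', hL', rfl⟩
                  have hk : k1 y = L' := hB' L' hL' y hyl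
                  have : k1 x < k1 y := by rw [hk]; exact lt_trans hcase (hlt L' hL')
                  simp [pvLex, this])]
        simp only [List.map_cons, List.flatten_cons]
        simp only [if_true]
        rw [if_neg (show ¬ (L = k1 x) from fun hc => hLx hc.symm)]
        simp only [List.singleton_append, List.cons.injEq, true_and]
        congr 2
        apply List.map_congr_left
        intro L' hL'
        rw [if_neg (show ¬ (L' = k1 x) from fun hc => hxS' (hc ▸ hL'))]
      · rw [if_neg (by simpa using hcase)]
        rw [pvInsertBy_append_skip (pvLex k1 k2) x (B L) ((S'.map B).flatten)
              (fun y hy => by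
                have hLlt : L < k1 x := lt_of_le_of_ne (not_lt.mp hcase) (fun hc => hLx hc.symm)
                have hk : k1 y = L := hB L (by simp) y hy
                have h1 : ¬ (k1 x < k1 y) := by rw [hk]; exact fun hc => absurd hLlt (lt_asymm hc)
                have h2 : k1 y < k1 x := hk ▸ hLlt
                simp [pvLex, h1, h2])]
        rw [ih hS' hB' hxS']
        simp only [List.map_cons, List.flatten_cons]
        rw [if_neg (show ¬ (L = k1 x) from fun hc => hLx hc.symm)]


-- a stable sort by the lexicographic (level, text) key is the concatenation, over the
-- sorted distinct levels, of the per-level stable sorts by text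
theorem pvSorted2_eq_blocks (k1 : Int → Int) (k2 : Int → List Char) (p : List Int) :
    PySem.List.sorted2 p k1 k2 false
      = ((PySem.List.sorted (PySem.Set.ofList (p.map k1)) (fun x => x) false).map
          (fun L => PySem.List.sorted (p.filter (fun u => k1 u == L)) k2 false)).flatten := by
  induction p using List.reverseRecOn with
  | nil => rfl
  | append_singleton p x ih =>
      rw [pvSorted2_foldl, List.foldl_append]
      simp only [List.foldl]
      rw [← pvSorted2_foldl, ih]
      have hset : PySem.Set.ofList ((p ++ [x]).map k1)
          = PySem.Set.add (PySem.Set.ofList (p.map k1)) (k1 x) := by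
        rw [List.map_append, PySem.Set.ofList_append]
        rfl
      have hSpair : (PySem.List.sorted (PySem.Set.ofList (p.map k1)) (fun x => x) false).Pairwise (· < ·) :=
        PySem.List.sorted_ofList_pairwise_lt (p.map k1)
      have hfilt : ∀ L : Int, (p ++ [x]).filter (fun u => k1 u == L)
          = p.filter (fun u => k1 u == L) ++ (if k1 x = L then [x] else []) := by
        intro L
        rw [List.filter_append]
        simp only [List.filter_cons, List.filter_nil, beq_iff_eq]
      have hB : ∀ L ∈ PySem.List.sorted (PySem.Set.ofList (p.map k1)) (fun x => x) false,
          ∀ u ∈ PySem.List.sorted (p.filter (fun u => k1 u == L)) k2 false, k1 u = L := by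
        intro L _ u hu
        have := (PySem.List.mem_sorted _ _ _ u).mp hu
        simpa using (List.mem_filter.mp this).2
      by_cases hmem : k1 x ∈ PySem.Set.ofList (p.map k1)
      · have hmemS : k1 x ∈ PySem.List.sorted (PySem.Set.ofList (p.map k1)) (fun x => x) false :=
          (PySem.List.mem_sorted _ _ _ _).mpr hmem
        rw [pvIns_mem k1 k2 x _ _ hSpair hB hmemS]
        rw [hset, PySem.Set.add,
          if_pos ((PySem.Set.contains_iff (PySem.Set.ofList (p.map k1)) (k1 x)).mpr hmem)]
        congr 1
        apply List.map_congr_left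
        intro L hL
        rw [hfilt L]
        by_cases hLx : L = k1 x
        · rw [if_pos hLx, if_pos hLx.symm]
          rw [pvSorted_foldl (p.filter (fun u => k1 u == L) ++ [x]) k2, List.foldl_append]
          simp only [List.foldl]
          rw [← pvSorted_foldl]
        · rw [if_neg hLx, if_neg (fun hc => hLx hc.symm), List.append_nil]
      · have hmemS : k1 x ∉ PySem.List.sorted (PySem.Set.ofList (p.map k1)) (fun x => x) false :=
          fun hc => hmem ((PySem.List.mem_sorted _ _ _ _).mp hc)
        rw [pvIns_new k1 k2 x _ _ hSpair hB hmemS]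
        rw [hset, PySem.Set.add,
          if_neg (fun hc => hmem ((PySem.Set.contains_iff _ _).mp hc))]
        have hnew : PySem.List.sorted ((PySem.Set.ofList (p.map k1) : List Int) ++ [k1 x]) (fun x => x) false
            = PySem.List.insertBy (fun a b : Int => decide (a < b)) (k1 x)
                (PySem.List.sorted (PySem.Set.ofList (p.map k1)) (fun x => x) false) := by
          rw [pvSortedInt_foldl, List.foldl_append]
          simp only [List.foldl]
          rw [← pvSortedInt_foldl]
        rw [hnew]
        congr 1
        apply List.map_congr_left
        intro L hL
        have hLmem : L = k1 x ∨ L ∈ PySem.List.sorted (PySem.Set.ofList (p.map k1)) (fun x => x) false :=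
          (PySem.List.mem_insertBy _ _ _ _).mp hL
        rw [hfilt L]
        by_cases hLx : L = k1 x
        · rw [if_pos hLx, if_pos hLx.symm]
          have hempty : p.filter (fun u => k1 u == L) = [] := by
            rw [List.filter_eq_nil_iff]
            intro a ha
            simp only [beq_iff_eq]
            intro hc
            exact hmem ((PySem.Set.mem_ofList _ _).mpr (hLx ▸ hc ▸ List.mem_map_of_mem ha))
          rw [hempty]
          rfl
        · rw [if_neg hLx, if_neg (fun hc => hLx hc.symm), List.append_nil]


theorem pvTakeWhile_none {α : Type} (p : α → Bool) (l : List α)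
    (h : ∀ a ∈ l, p a = false) : l.takeWhile p = [] := by
  cases l with
  | nil => rfl
  | cons a t => simp [h a (by simp)]

theorem pvDropWhile_none {α : Type} (p : α → Bool) (l : List α)
    (h : ∀ a ∈ l, p a = false) : l.dropWhile p = l := by
  cases l with
  | nil => rfl
  | cons a t => simp [h a (by simp)]

theorem pvTakeWhile_append_all {α : Type} (p : α → Bool) (l1 l2 : List α)
    (h : ∀ a ∈ l1, p a = true) : (l1 ++ l2).takeWhile p = l1 ++ l2.takeWhile p := by
  induction l1 with
  | nil => rfl
  | cons a t ih =>
      simp [h a (by simp), ih (fun b hb => h b (by simp [hb]))]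

theorem pvDropWhile_append_all {α : Type} (p : α → Bool) (l1 l2 : List α)
    (h : ∀ a ∈ l1, p a = true) : (l1 ++ l2).dropWhile p = l2.dropWhile p := by
  induction l1 with
  | nil => rfl
  | cons a t ih =>
      simp [h a (by simp), ih (fun b hb => h b (by simp [hb]))]

-- grouping consecutive equal levels of flattened blocks recovers the blocks
theorem pvGroup_flatten (lvf : Int → Int) (S : List Int) (B : Int → List Int)
    (hS : S.Pairwise (· < ·)) (hne : ∀ L ∈ S, B L ≠ [])
    (hlv : ∀ L ∈ S, ∀ u ∈ B L, lvf u = L) :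
    pvB_group lvf ((S.map B).flatten) = S.map (fun L => (L, B L)) := by
  induction S with
  | nil => simp [pvB_group]
  | cons L S' ih =>
      have hlt : ∀ L' ∈ S', L < L' := (List.pairwise_cons.mp hS).1
      have hS' : S'.Pairwise (· < ·) := (List.pairwise_cons.mp hS).2
      have hrest : ∀ y ∈ (S'.map B).flatten, (lvf y == L) = false := by
        intro y hy
        rcases List.mem_flatten.mp hy with ⟨l, hl, hyl⟩
        rcases List.mem_map.mp hl with ⟨L', hL', rfl⟩
        have hk : lvf y = L' := hlv L' (by simp [hL']) y hyl
        simp only [beq_eq_false_iff_ne, ne_eq, hk]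
        exact fun hc => absurd (hc ▸ hlt L' hL') (lt_irrefl _)
      obtain ⟨u, us, hBL⟩ : ∃ u us, B L = u :: us := by
        cases hBLc : B L with
        | nil => exact absurd hBLc (hne L (by simp))
        | cons a t => exact ⟨a, t, rfl⟩
      have hu : lvf u = L := hlv L (by simp) u (by simp [hBL])
      have hus : ∀ v ∈ us, (lvf v == lvf u) = true := by
        intro v hv
        have : lvf v = L := hlv L (by simp) v (by simp [hBL, hv])
        simp [this, hu]
      simp only [List.map_cons, List.flatten_cons, hBL, List.cons_append]
      rw [pvB_group]
      rw [pvTakeWhile_append_all _ us _ hus,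
        pvTakeWhile_none _ _ (fun a ha => by rw [hu]; exact hrest a ha),
        pvDropWhile_append_all _ us _ hus,
        pvDropWhile_none _ _ (fun a ha => by rw [hu]; exact hrest a ha)]
      rw [ih hS' (fun L' h' => hne L' (by simp [h'])) (fun L' h' => hlv L' (by simp [h']))]
      simp [hu]


-- within one level, A's root-first + sort-by-name equals B's sort by the text key
theorem pvLevel_eq (root_id L : Int) (lv : Int → Int) (kA : Int → List Char) (ids : List Int)
    (hnd : ids.Nodup) (hids : ∀ u ∈ ids, lv u = L) :
    (if L = 0 then
      (if root_id ∈ ids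
        then root_id :: PySem.List.sorted (ids.filter (fun u => u ≠ root_id)) kA false
        else PySem.List.sorted (ids.filter (fun u => u ≠ root_id)) kA false)
     else PySem.List.sorted ids kA false)
    = PySem.List.sorted ids (fun u => if lv u = 0 ∧ u = root_id then [] else '\x00' :: kA u) false := by
  by_cases hL : L = 0
  · rw [if_pos hL]
    by_cases hroot : root_id ∈ ids
    · rw [if_pos hroot]
      rw [pvSorted_min_front (fun u => if lv u = 0 ∧ u = root_id then [] else '\x00' :: kA u)
            root_id ids hnd hroot
            (fun u hu hne => by
              have h0 : lv root_id = 0 := hL ▸ hids root_id hroot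
              beta_reduce
              rw [if_pos ⟨h0, rfl⟩, if_neg (fun hc => hne hc.2)]
              exact List.nil_lt_cons _ _)]
      congr 1
      apply pvSorted_congr
      intro a ha b hb
      have hane : a ≠ root_id := by simpa using (List.mem_filter.mp ha).2
      have hbne : b ≠ root_id := by simpa using (List.mem_filter.mp hb).2
      rw [if_neg (fun hc => hane hc.2), if_neg (fun hc => hbne hc.2)]
      exact (List.cons_lt_cons_self).symm
    · rw [if_neg hroot]
      rw [List.filter_eq_self.mpr (fun a ha => by
        simp only [ne_eq, decide_not, Bool.not_eq_eq_eq_not, Bool.not_true, decide_eq_false_iff_not]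
        exact fun hc : a = root_id => hroot (hc ▸ ha))]
      apply pvSorted_congr
      intro a ha b hb
      have hane : a ≠ root_id := fun hc : a = root_id => hroot (hc ▸ ha)
      have hbne : b ≠ root_id := fun hc : b = root_id => hroot (hc ▸ hb)
      rw [if_neg (fun hc => hane hc.2), if_neg (fun hc => hbne hc.2)]
      exact (List.cons_lt_cons_self).symm
  · rw [if_neg hL]
    apply pvSorted_congr
    intro a ha b hb
    beta_reduce
    rw [if_neg (fun hc : lv a = 0 ∧ a = root_id => hL ((hids a ha).symm.trans hc.1)),
        if_neg (fun hc : lv b = 0 ∧ b = root_id => hL ((hids b hb).symm.trans hc.1))]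
    exact (List.cons_lt_cons_self).symm

theorem pvMain_core (root_id : Int) (keys : List Int) (lv : Int → Int) (kA : Int → List Char)
    (hnd : keys.Nodup) :
    (PySem.List.sorted
        (keys.foldl (fun d u => d.modify (lv u) [] (fun l => l ++ [u])) PySem.Dict.empty).keys
        (fun x => x) false).foldl
      (fun rows level =>
        rows ++ [(level,
          if level = 0 then
            (if root_id ∈ (keys.foldl (fun d u => d.modify (lv u) [] (fun l => l ++ [u])) PySem.Dict.empty).getD level []
             then root_id :: PySem.List.sorted (((keys.foldl (fun d u => d.modify (lv u) [] (fun l => l ++ [u])) PySem.Dict.empty).getD level []).filter (fun u => u ≠ root_id)) kA false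
             else PySem.List.sorted (((keys.foldl (fun d u => d.modify (lv u) [] (fun l => l ++ [u])) PySem.Dict.empty).getD level []).filter (fun u => u ≠ root_id)) kA false)
          else PySem.List.sorted ((keys.foldl (fun d u => d.modify (lv u) [] (fun l => l ++ [u])) PySem.Dict.empty).getD level []) kA false)]) []
    = pvB_group lv (PySem.List.sorted2 keys lv
        (fun u => if lv u = 0 ∧ u = root_id then [] else '\x00' :: kA u) false) := by
  set rm := keys.foldl (fun d u => d.modify (lv u) [] (fun l => l ++ [u])) PySem.Dict.empty with hrm
  have h1 : rm.keys = PySem.Set.ofList (keys.map lv) := by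
    have h := PySem.Dict.keys_foldl_modify_key keys lv ([] : List Int)
      (fun _ x => fun l => l ++ [x]) (PySem.Dict.empty)
    simpa [PySem.Dict.keys_empty, PySem.Set.update_empty, hrm] using h
  have h2 : ∀ L : Int, rm.getD L [] = keys.filter (fun u => lv u == L) := by
    intro L
    have h := PySem.Dict.getD_foldl_modify_append (keys.map (fun u => (lv u, u)))
      (PySem.Dict.empty) L
    rw [List.foldl_map] at h
    simpa [hrm, List.filter_map, List.map_map, Function.comp_def] using h
  have hSpair : (PySem.List.sorted rm.keys (fun x => x) false).Pairwise (· < ·) := by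
    rw [h1]; exact PySem.List.sorted_ofList_pairwise_lt (keys.map lv)
  rw [PySem.List.foldl_append_singleton_eq_map, List.nil_append]
  rw [pvSorted2_eq_blocks lv
    (fun u => if lv u = 0 ∧ u = root_id then [] else '\x00' :: kA u) keys]
  rw [← h1]
  rw [pvGroup_flatten lv (PySem.List.sorted rm.keys (fun x => x) false)
    (fun L => PySem.List.sorted (keys.filter (fun u => lv u == L))
        (fun u => if lv u = 0 ∧ u = root_id then [] else '\x00' :: kA u) false)
    hSpair
    (fun L hL => by
      have hmem : L ∈ keys.map lv := by
        have := (PySem.List.mem_sorted _ _ _ _).mp hL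
        rw [h1] at this
        exact (PySem.Set.mem_ofList _ _).mp this
      rcases List.mem_map.mp hmem with ⟨u, hu, rfl⟩
      rw [ne_eq, PySem.List.sorted_eq_nil_iff]
      intro hc
      have : u ∈ keys.filter (fun v => lv v == lv u) := List.mem_filter.mpr ⟨hu, by simp⟩
      rw [hc] at this
      simp at this)
    (fun L hL u hu => by
      have := (PySem.List.mem_sorted _ _ _ _).mp hu
      simpa using (List.mem_filter.mp this).2)]
  apply List.map_congr_left
  intro L hL
  have hids : rm.getD L [] = keys.filter (fun u => lv u == L) := h2 L
  have hndids : (rm.getD L []).Nodup := by rw [hids]; exact hnd.filter _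
  have hlvids : ∀ u ∈ rm.getD L [], lv u = L := by
    intro u hu
    rw [hids] at hu
    simpa using (List.mem_filter.mp hu).2
  rw [← hids]
  exact congrArg (fun z => (L, z)) (pvLevel_eq root_id L lv kA (rm.getD L []) hndids hlvids)

theorem pvMain (root_id : Int) (graph : List (Int × List Int)) (levels : List (Int × Int)) (name_map : List (Int × String)) :
    build_family_rows root_id graph levels name_map
      = build_family_rows_alt root_id graph levels name_map :=
  pvMain_core root_id (PySem.Dict.ofList graph).keys
    (fun u => (PySem.Dict.ofList levels).getD u 0)
    (fun u => PySem.Chars.lower ((PySem.Dict.ofList name_map).getD u "").toList)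
    (PySem.Dict.nodup_keys_ofList graph)

-- ===== VERDICT (by name: the statement is the Claim_ definition above) =====
theorem build_family_rows_spec : Claim_equal_build_family_rows := by
  intro root_id graph levels name_map _ _
  exact pvMain root_id graph levels name_map
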